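-- pv_equiv track=rewrite | github.com/HannoJacobs/Sequence-to-Set-Model | src/synth_dataset_gen.py | pattern_arithmetic_progression
-- ===== SOURCE A (Python) =====
-- def pattern_arithmetic_progression(a, b, length):
--     """Generate arithmetic progression with difference (b-a), bounded to positive numbers"""
--     diff = b - a
--     sequence = []
--     for i in range(length):
--         val = a + i * diff
--         # Keep numbers positive and reasonable (0-99)
--         val = abs(val) % 100
--         sequence.append(val)
--     return sequence
-- ===== SOURCE B (Python) =====
-- def pattern_arithmetic_progression(a, b, length):
--     """Generate arithmetic progression with difference (b-a), bounded to positive numbers"""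
--     diff = b - a
--     result = []
--     cur = a
--     for _ in range(length):
--         result.append(abs(cur) % 100)
--         cur += diff
--     return result
-- ===== Notes on version B (the rewrite author's own statement) =====
-- stated objective: alternative
-- what changed: B maintains the progression value in a running accumulator (cur += diff each step, loop not indexed) instead of recomputing a + i*diff from the loop index each iteration.
import Mathlib
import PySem

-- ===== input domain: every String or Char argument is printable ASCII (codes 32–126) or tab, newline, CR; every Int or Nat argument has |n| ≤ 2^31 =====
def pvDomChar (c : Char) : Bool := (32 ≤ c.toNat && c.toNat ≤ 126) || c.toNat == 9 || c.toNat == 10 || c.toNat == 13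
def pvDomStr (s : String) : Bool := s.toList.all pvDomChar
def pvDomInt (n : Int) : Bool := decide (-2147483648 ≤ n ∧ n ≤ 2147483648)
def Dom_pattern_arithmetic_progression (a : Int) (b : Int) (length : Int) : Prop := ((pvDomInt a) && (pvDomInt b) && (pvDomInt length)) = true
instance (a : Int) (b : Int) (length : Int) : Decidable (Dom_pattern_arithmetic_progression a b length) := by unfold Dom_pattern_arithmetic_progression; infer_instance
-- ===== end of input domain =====

-- B maintains a running accumulator (cur += diff) instead of recomputing a + i*diff from the index; same output, alternative decomposition.


-- ===== PORT A =====
def pattern_arithmetic_progression (a : Int) (b : Int) (length : Int) : List Int :=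
  let diff := b - a
  (PySem.List.pyRange 0 length 1).foldl
    (fun sequence i => sequence ++ [PySem.Int.mod |a + i * diff| 100]) []

-- ===== PORT B =====
-- loop body of B: emit |cur| % 100, then advance cur by diff; fuel = number of iterations
def pvAltGo (cur : Int) (diff : Int) : Nat → List Int
  | 0 => []
  | n + 1 => PySem.Int.mod |cur| 100 :: pvAltGo (cur + diff) diff n

def pattern_arithmetic_progression_alt (a : Int) (b : Int) (length : Int) : List Int :=
  let diff := b - a
  pvAltGo a diff length.toNat

-- ===== PRECONDITION & SPEC =====
def Spec_pattern_arithmetic_progression (a : Int) (b : Int) (length : Int) (out : List Int) : Prop := out = pattern_arithmetic_progression_alt a b length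
instance (a : Int) (b : Int) (length : Int) (out : List Int) : Decidable (Spec_pattern_arithmetic_progression a b length out) := by unfold Spec_pattern_arithmetic_progression; infer_instance

-- ===== CLAIM (what is proved, stated in full; the proofs are below) =====
def Claim_equal_pattern_arithmetic_progression : Prop := ∀ (a : Int) (b : Int) (length : Int), Dom_pattern_arithmetic_progression a b length → Spec_pattern_arithmetic_progression a b length (pattern_arithmetic_progression a b length)

-- ===== LEMMAS AND PROOFS =====
theorem pv_foldl_append {α β : Type} (f : α → β) :
    ∀ (l : List α) (init : List β),
      l.foldl (fun s i => s ++ [f i]) init = init ++ l.map f := by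
  intro l
  induction l with
  | nil => simp
  | cons x xs ih => intro init; simp [List.foldl, ih]

theorem pv_go_eq (d : Int) :
    ∀ (n : Nat) (cur : Int),
      pvAltGo cur d n = (List.range n).map (fun (k : Nat) => PySem.Int.mod |cur + (k : Int) * d| 100) := by
  intro n
  induction n with
  | zero => intro cur; simp [pvAltGo]
  | succ m ih =>
      intro cur
      rw [List.range_succ_eq_map]
      simp only [pvAltGo, ih, List.map_cons, List.map_map]
      refine congrArg₂ List.cons ?_ ?_
      · norm_num
      · apply List.map_congr_left
        intro k _
        simp only [Function.comp]
        congr 2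
        push_cast
        ring

-- ===== VERDICT (by name: the statement is the Claim_ definition above) =====
theorem pattern_arithmetic_progression_spec : Claim_equal_pattern_arithmetic_progression := by
  intro a b length _
  unfold Spec_pattern_arithmetic_progression
  unfold pattern_arithmetic_progression pattern_arithmetic_progression_alt
  rw [pv_foldl_append, pv_go_eq, PySem.List.pyRange_one]
  simp only [List.nil_append, List.map_map, Int.sub_zero]
  apply List.map_congr_left
  intro k _
  simp only [Function.comp]
  congr 2
  ring
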